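-- pv_equiv track=rewrite | github.com/anitazhaochen/nowcoder | nowcodezcy/1.py | solution
-- ===== SOURCE A (Python) =====
-- def solution(line1=None, line2=None):
--
--
--     all = line1[2] * line1[0]
--     c = 0
--     for row in line2:
--         c += row[0]
--
--     need = all - c
--
--     needtime = 0
--
--     line2.sort(key=lambda x:x[1])
--     for row in line2:
--         while row[0] < line1[1]:
--             if need == 0:
--                 return needtime
--             need -= 1
--             needtime += row[1]
--             row[0] += 1
--
--     return needtime
-- ===== SOURCE B (Python) =====
-- def solution(line1=None, line2=None):
--     cap = line1[1]
--     target = line1[2] * line1[0]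
--     have = sum(row[0] for row in line2)
--     total = 0
--     for row in sorted(line2, key=lambda r: r[1]):
--         space = max(0, cap - row[0])
--         if have <= target < have + space:
--             space = target - have
--         have += space
--         total += space * row[1]
--     return total
-- ===== Notes on version B (the rewrite author's own statement) =====
-- stated objective: faster
-- what changed: Replaces A's unit-by-unit inner while loop (one countdown iteration per unit of remaining need) by a per-row batch: B advances a running unit count toward the target and charges each sorted row's whole free space with one multiplication, cutting the batch short exactly when the target falls inside that row, so the work no longer depends on the number of units bought.
import Mathlib
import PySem

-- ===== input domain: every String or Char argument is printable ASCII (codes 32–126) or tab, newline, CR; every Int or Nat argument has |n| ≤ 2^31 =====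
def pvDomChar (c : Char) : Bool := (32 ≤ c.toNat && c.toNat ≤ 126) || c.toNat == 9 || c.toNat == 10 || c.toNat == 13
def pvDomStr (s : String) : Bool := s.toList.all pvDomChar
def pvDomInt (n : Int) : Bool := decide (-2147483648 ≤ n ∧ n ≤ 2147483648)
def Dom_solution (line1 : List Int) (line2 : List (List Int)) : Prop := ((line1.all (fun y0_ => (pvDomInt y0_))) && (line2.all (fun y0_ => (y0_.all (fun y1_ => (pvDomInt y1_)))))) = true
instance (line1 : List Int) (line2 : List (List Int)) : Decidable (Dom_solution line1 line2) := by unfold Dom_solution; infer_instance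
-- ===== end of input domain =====

-- B replaces A's unit-by-unit countdown (one inner-loop iteration per unit) by a per-row batch:
-- it advances a running unit count toward the target and charges each sorted row's batch with
-- one multiplication. Equivalence is about the RETURN value only: Python A sorts line2 in
-- place and mutates each row[0], which B does not.

-- ===== PORT A =====
-- the inner 'while row[0] < line1[1]' loop; returns (need, needtime, early-return flag)
def innerA (cap cost row0 need needtime : Int) : Int × Int × Bool :=
  if _h : row0 < cap then
    if _hn : need = 0 then (need, needtime, true)
    else innerA cap cost (row0 + 1) (need - 1) (needtime + cost)
  else (need, needtime, false)
termination_by (cap - row0).toNat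
decreasing_by omega

-- the outer 'for row in line2' loop after the sort
def loopA (cap : Int) (need needtime : Int) : List (List Int) → Int
  | [] => needtime
  | r :: rs =>
    let res := innerA cap ((PySem.List.pyGet? r 1).getD 0) ((PySem.List.pyGet? r 0).getD 0) need needtime
    if res.2.2 then res.2.1 else loopA cap res.1 res.2.1 rs

def solution (line1 : List Int) (line2 : List (List Int)) : Int :=
  let all := (PySem.List.pyGet? line1 2).getD 0 * (PySem.List.pyGet? line1 0).getD 0
  let c := line2.foldl (fun acc row => acc + (PySem.List.pyGet? row 0).getD 0) 0
  let need := all - c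
  loopA ((PySem.List.pyGet? line1 1).getD 0) need 0
    (PySem.List.sorted line2 (fun r => (PySem.List.pyGet? r 1).getD 0) false)

-- ===== PORT B =====
-- B's loop: hv is the running unit count, target the demanded total; a row's batch is its free
-- space, cut short exactly when the target falls inside this row's space
def loopB (cap target : Int) (hv total : Int) : List (List Int) → Int
  | [] => total
  | r :: rs =>
    let space := max 0 (cap - (PySem.List.pyGet? r 0).getD 0)
    let take := if hv ≤ target ∧ target < hv + space then target - hv else space
    loopB cap target (hv + take) (total + take * (PySem.List.pyGet? r 1).getD 0) rs

def solution_alt (line1 : List Int) (line2 : List (List Int)) : Int :=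
  let cap := (PySem.List.pyGet? line1 1).getD 0
  let target := (PySem.List.pyGet? line1 2).getD 0 * (PySem.List.pyGet? line1 0).getD 0
  let hv := line2.foldl (fun acc row => acc + (PySem.List.pyGet? row 0).getD 0) 0
  loopB cap target hv 0 (PySem.List.sorted line2 (fun r => (PySem.List.pyGet? r 1).getD 0) false)

-- ===== PRECONDITION & SPEC =====
-- Pre_ excludes exactly the inputs where Python A raises IndexError: line1 shorter than 3
-- (line1[2]/line1[0]/line1[1]) or a row shorter than 2 (row[0], sort key row[1]).
def Pre_solution (line1 : List Int) (line2 : List (List Int)) : Prop :=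
  3 ≤ line1.length ∧ ∀ r ∈ line2, 2 ≤ r.length
instance (line1 : List Int) (line2 : List (List Int)) : Decidable (Pre_solution line1 line2) := by
  unfold Pre_solution; infer_instance
def pvWitness_solution : List Int × List (List Int) := ([2, 3, 2], [[1, 5], [2, 1]])

def Spec_solution (line1 : List Int) (line2 : List (List Int)) (out : Int) : Prop := out = solution_alt line1 line2
instance (line1 : List Int) (line2 : List (List Int)) (out : Int) : Decidable (Spec_solution line1 line2 out) := by unfold Spec_solution; infer_instance

-- ===== CLAIM (what is proved, stated in full; the proofs are below) =====
def Claim_equal_solution : Prop := ∀ (line1 : List Int) (line2 : List (List Int)), Dom_solution line1 line2 → Pre_solution line1 line2 → Spec_solution line1 line2 (solution line1 line2)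

-- ===== LEMMAS AND PROOFS =====

-- the number of units A's inner loop takes from a row
def takeOf (cap row0 need : Int) : Int :=
  if need < 0 then max (cap - row0) 0 else min (max (cap - row0) 0) need

theorem innerA_eq (cap cost row0 need needtime : Int) :
    innerA cap cost row0 need needtime =
      (need - takeOf cap row0 need, needtime + takeOf cap row0 need * cost,
        decide (0 ≤ need ∧ need < cap - row0)) := by
  fun_induction innerA cap cost row0 need needtime with
  | case1 row0 needtime h =>
    simp only [takeOf, Prod.mk.injEq]
    have hmn : ¬ ((0 : Int) < 0) := by omega
    rw [if_neg hmn]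
    refine ⟨by omega, by have hz : min (max (cap - row0) 0) 0 = 0 := by omega
                         rw [hz]; ring, by simp; omega⟩
  | case2 row0 need needtime h hn ih =>
    rw [ih]
    simp only [takeOf, Prod.mk.injEq] at *
    by_cases hneg : need < 0
    · have h1 : need - 1 < 0 := by omega
      simp only [if_pos hneg, if_pos h1]
      refine ⟨by omega, by have hx : max (cap - (row0 + 1)) 0 = max (cap - row0) 0 - 1 := by omega
                           rw [hx]; ring, by simp only [decide_eq_decide]; omega⟩
    · have h1 : ¬ (need - 1 < 0) := by omega
      simp only [if_neg hneg, if_neg h1]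
      have hm : min (max (cap - (row0 + 1)) 0) (need - 1) = min (max (cap - row0) 0) need - 1 := by
        omega
      refine ⟨by omega, by rw [hm]; ring, by simp only [decide_eq_decide]; omega⟩
  | case3 row0 need needtime h =>
    simp only [takeOf, Prod.mk.injEq]
    have hav : max (cap - row0) 0 = 0 := by omega
    rw [hav]
    refine ⟨by split <;> omega,
      by by_cases hneg : need < 0
         · rw [if_pos hneg]; ring
         · rw [if_neg hneg]
           have hz : min (0 : Int) need = 0 := by omega
           rw [hz]; ring,
      by simp; omega⟩

-- once the running count sits on the target, every later batch is empty
theorem loopB_at_target (cap target : Int) (total : Int) (rs : List (List Int)) :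
    loopB cap target target total rs = total := by
  induction rs generalizing total with
  | nil => rfl
  | cons r rs ih =>
    simp only [loopB]
    have htake : (if target ≤ target ∧ target < target + max 0 (cap - (PySem.List.pyGet? r 0).getD 0)
        then target - target else max 0 (cap - (PySem.List.pyGet? r 0).getD 0)) = 0 := by
      split_ifs with h <;> omega
    rw [htake]
    simpa using ih total

-- the per-row batches of the two loops coincide for EVERY remaining need (= target - hv)
theorem loopA_eq_loopB (cap target : Int) (rs : List (List Int)) :
    ∀ (hv acc : Int), loopA cap (target - hv) acc rs = loopB cap target hv acc rs := by
  induction rs with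
  | nil => intro hv acc; rfl
  | cons r rs ih =>
    intro hv acc
    simp only [loopA, loopB, innerA_eq]
    set row0 := (PySem.List.pyGet? r 0).getD 0 with hrow0
    set cost := (PySem.List.pyGet? r 1).getD 0 with hcost
    by_cases hflag : 0 ≤ target - hv ∧ target - hv < cap - row0
    · -- A returns early inside this row; B's batch is cut to the target and later batches are empty
      have hd : decide (0 ≤ target - hv ∧ target - hv < cap - row0) = true := by
        rw [decide_eq_true_iff]; exact hflag
      simp only [hd, if_true]
      obtain ⟨hf1, hf2⟩ := hflag
      rw [if_pos (⟨by omega, by omega⟩ : hv ≤ target ∧ target < hv + max 0 (cap - row0))]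
      have htk : takeOf cap row0 (target - hv) = target - hv := by
        simp only [takeOf]; omega
      rw [htk]
      have hh : hv + (target - hv) = target := by omega
      rw [hh, loopB_at_target]
    · have hd : decide (0 ≤ target - hv ∧ target - hv < cap - row0) = false := by simp; omega
      simp only [hd, if_false, Bool.false_eq_true]
      have hc : ¬ (hv ≤ target ∧ target < hv + max 0 (cap - row0)) := by omega
      rw [if_neg hc]
      have htk : takeOf cap row0 (target - hv) = max 0 (cap - row0) := by
        simp only [takeOf]; split <;> omega
      rw [htk]
      have hh : target - hv - max 0 (cap - row0) = target - (hv + max 0 (cap - row0)) := by omega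
      rw [hh, ih]

theorem solution_spec : Claim_equal_solution := by
  intro line1 line2 _hdom _hpre
  unfold Spec_solution solution solution_alt
  simp only []
  exact loopA_eq_loopB _ _ _ _ _
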